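-- pv_equiv track=rewrite | github.com/tano297/WaveNet | text-to-speech.py | trim_to_nearest_punctuation
-- ===== SOURCE A (Python) =====
-- import string
--
-- def trim_to_nearest_punctuation(input_str):
--     # Set of punctuation marks
--     punctuation_set = set(string.punctuation)
--     if len(input_str.split()) < 20:
--         return input_str
--     # Iterate through the characters to find the nearest punctuation
--     for i, char in enumerate(input_str):
--         if char in punctuation_set:
--             return input_str[:i]
--
--     # If no punctuation is found, return the original string
--     return input_str
-- ===== SOURCE B (Python) =====
-- import string
--
-- def trim_to_nearest_punctuation(input_str):
--     if len(input_str.split()) < 20: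
--         return input_str
--     cuts = [i for i in (input_str.find(p) for p in string.punctuation) if i >= 0]
--     if cuts:
--         return input_str[:min(cuts)]
--     return input_str
-- ===== Notes on version B (the rewrite author's own statement) =====
-- stated objective: alternative
-- what changed: Replaces the single left-to-right character scan with an early return by a per-punctuation-mark str.find pass whose non-negative results are reduced with min().
import Mathlib
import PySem

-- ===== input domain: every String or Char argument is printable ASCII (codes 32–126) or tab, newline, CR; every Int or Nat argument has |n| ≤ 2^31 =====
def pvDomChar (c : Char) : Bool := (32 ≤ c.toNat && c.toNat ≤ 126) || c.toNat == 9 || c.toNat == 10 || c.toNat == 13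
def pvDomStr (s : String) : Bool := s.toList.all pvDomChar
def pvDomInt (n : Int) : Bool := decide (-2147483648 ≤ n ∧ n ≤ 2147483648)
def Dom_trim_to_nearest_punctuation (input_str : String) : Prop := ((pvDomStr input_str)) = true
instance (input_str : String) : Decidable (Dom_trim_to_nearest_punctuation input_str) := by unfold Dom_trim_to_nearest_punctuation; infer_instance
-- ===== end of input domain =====

-- B replaces A's single left-to-right character scan by per-punctuation-mark str.find passes
-- reduced with min(); objective: alternative (same asymptotic cost, differently-shaped passes).

-- ===== PORT A =====
-- string.punctuation
def pvPunctuation : String := "!\"#$%&'()*+,-./:;<=>?@[\\]^_`{|}~"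

-- the 'for i, char in enumerate(input_str)' loop with its early return
def pvScanLoop (pset : PySem.Set Char) (input_str : String) : List (Int × Char) → String
  | [] => input_str
  | (i, c) :: rest =>
    if PySem.Set.contains pset c then PySem.Str.slice input_str none (some i)
    else pvScanLoop pset input_str rest

def trim_to_nearest_punctuation (input_str : String) : String :=
  let punctuation_set : PySem.Set Char := PySem.Set.ofList pvPunctuation.toList
  if (PySem.Str.split₀ input_str).length < 20 then input_str
  else pvScanLoop punctuation_set input_str (PySem.List.enumerate input_str.toList 0)

-- ===== PORT B =====
def trim_to_nearest_punctuation_alt (input_str : String) : String :=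
  if (PySem.Str.split₀ input_str).length < 20 then input_str
  else
    let cuts : List Int :=
      (pvPunctuation.toList.map (fun p => PySem.Str.find input_str (String.ofList [p]))).filter
        (fun i => 0 ≤ i)
    match PySem.List.min? cuts (fun x => x) with
    | some m => PySem.Str.slice input_str none (some m)
    | none => input_str

-- ===== PRECONDITION & SPEC =====
def Spec_trim_to_nearest_punctuation (input_str : String) (out : String) : Prop := out = trim_to_nearest_punctuation_alt input_str
instance (input_str : String) (out : String) : Decidable (Spec_trim_to_nearest_punctuation input_str out) := by unfold Spec_trim_to_nearest_punctuation; infer_instance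

-- ===== CLAIM (what is proved, stated in full; the proofs are below) =====
def Claim_equal_trim_to_nearest_punctuation : Prop := ∀ (input_str : String), Dom_trim_to_nearest_punctuation input_str → Spec_trim_to_nearest_punctuation input_str (trim_to_nearest_punctuation input_str)

-- ===== LEMMAS AND PROOFS =====

-- [c] is a prefix of l.drop k iff l[k]? = some c
lemma pv_singleton_prefix_drop {c : Char} {l : List Char} {k : Nat} :
    [c] <+: l.drop k ↔ l[k]? = some c := by
  rw [← List.head?_drop]
  constructor
  · rintro ⟨t, ht⟩
    rw [← ht]; rfl
  · intro h
    cases hd : l.drop k with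
    | nil => simp [hd] at h
    | cons x t =>
      simp [hd] at h
      exact ⟨t, by simp [h]⟩

-- [c] is an infix of l iff c ∈ l
lemma pv_singleton_infix {c : Char} {l : List Char} : [c] <:+: l ↔ c ∈ l := by
  constructor
  · intro h; exact (List.singleton_sublist).mp h.sublist
  · intro h
    obtain ⟨k, hk, hc⟩ := List.getElem_of_mem h
    exact List.infix_iff_prefix_suffix.mpr ⟨l.drop k, pv_singleton_prefix_drop.mpr (by rw [List.getElem?_eq_getElem hk, hc]), List.drop_suffix k l⟩

-- Chars.find of a singleton pattern = first index of that character
lemma pv_find_singleton_eq {c : Char} {l : List Char} {j : Nat}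
    (hj : j < l.length) (hc : l[j] = c) (hmin : ∀ i, ∀ _ : i < j, l[i]'(lt_trans ‹i < j› hj) ≠ c) :
    PySem.Chars.find l [c] = (j : Int) := by
  have hin : [c] <:+: l := pv_singleton_infix.mpr (hc ▸ l.getElem_mem hj)
  have hnn : 0 ≤ PySem.Chars.find l [c] := (PySem.Chars.find_nonneg_iff l [c]).mpr hin
  obtain ⟨hpre, hfirst⟩ := PySem.Chars.find_spec hnn
  have hge : j ≤ (PySem.Chars.find l [c]).toNat := by
    by_contra h
    push Not at h
    have := pv_singleton_prefix_drop.mp hpre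
    have hlt : (PySem.Chars.find l [c]).toNat < l.length := lt_of_lt_of_le h (le_of_lt hj)
    rw [List.getElem?_eq_getElem hlt] at this
    exact hmin _ h (by simpa using this)
  have hle : (PySem.Chars.find l [c]).toNat ≤ j := by
    by_contra h
    push Not at h
    exact hfirst j h (pv_singleton_prefix_drop.mpr (by simp [hc, hj]))
  omega

-- the scan loop over enumerate, characterised by findIdx?
lemma pv_scanLoop_eq (pset : PySem.Set Char) (s : String) (l : List Char) (k : Int) :
    pvScanLoop pset s (PySem.List.enumerate l k) =
      match l.findIdx? (fun c => decide (c ∈ pset)) with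
      | some j => PySem.Str.slice s none (some (k + (j : Int)))
      | none => s := by
  induction l generalizing k with
  | nil => simp [PySem.List.enumerate_nil, pvScanLoop]
  | cons x t ih =>
    rw [PySem.List.enumerate_cons, List.findIdx?_cons]
    by_cases hx : x ∈ pset
    · simp [pvScanLoop, PySem.Set.contains, hx]
    · simp only [pvScanLoop, PySem.Set.contains]
      rw [if_neg (by simp [hx]), if_neg (by simp [hx]), ih]
      cases h : t.findIdx? (fun c => decide (c ∈ pset)) with
      | none => simp
      | some j =>
        simp only [Option.map_some]
        congr 2
        push_cast
        ring
-- ===== VERDICT (by name: the statement is the Claim_ definition above) =====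
-- the heart of the equivalence: first punct index by scanning = min over per-mark first indices
lemma pv_main (s : String) :
    pvScanLoop (PySem.Set.ofList pvPunctuation.toList) s
        (PySem.List.enumerate s.toList 0) =
      match PySem.List.min?
          ((pvPunctuation.toList.map (fun p => PySem.Str.find s (String.ofList [p]))).filter
            (fun i => 0 ≤ i)) (fun x => x) with
      | some m => PySem.Str.slice s none (some m)
      | none => s := by
  set P := pvPunctuation.toList with hP
  set l := s.toList with hl
  set pset := PySem.Set.ofList P with hpset
  have hmem : ∀ c : Char, c ∈ pset ↔ c ∈ P := fun c => PySem.Set.mem_ofList P c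
  have hfind : ∀ p : Char, PySem.Str.find s (String.ofList [p]) = PySem.Chars.find l [p] := by
    intro p; simp [PySem.Str.find_eq, hl]
  rw [pv_scanLoop_eq]
  cases hidx : l.findIdx? (fun c => decide (c ∈ pset)) with
  | none =>
    have hnone := List.findIdx?_eq_none_iff.mp hidx
    have hcuts : (P.map (fun p => PySem.Str.find s (String.ofList [p]))).filter (fun i => 0 ≤ i) = [] := by
      rw [List.filter_eq_nil_iff]
      intro x hx
      obtain ⟨p, hp, hpx⟩ := List.mem_map.mp hx
      intro h0'
      have h0 : (0:Int) ≤ x := by simpa using h0'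
      rw [hfind p] at hpx
      have : [p] <:+: l := (PySem.Chars.find_nonneg_iff l [p]).mp (hpx ▸ h0)
      have hpl : p ∈ l := pv_singleton_infix.mp this
      have := hnone p hpl
      rw [decide_eq_false_iff_not, hmem] at this
      exact this hp
    rw [hcuts]
    rfl
  | some j =>
    obtain ⟨hj, hcj, hmin⟩ := List.findIdx?_eq_some_iff_getElem.mp hidx
    simp only [decide_eq_true_eq] at hcj
    set c := l[j] with hc
    have hcP : c ∈ P := (hmem c).mp hcj
    have hfj : PySem.Chars.find l [c] = (j : Int) := by
      apply pv_find_singleton_eq hj rfl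
      intro i hi hic
      have := hmin i hi
      simp only [decide_eq_true_eq] at this
      exact this ((hmem _).mpr (hic ▸ hcP))
    set cuts := (P.map (fun p => PySem.Str.find s (String.ofList [p]))).filter (fun i => 0 ≤ i) with hcuts
    have hjmem : (j : Int) ∈ cuts := by
      rw [hcuts]
      apply List.mem_filter.mpr
      refine ⟨List.mem_map.mpr ⟨c, hcP, by rw [hfind c, hfj]⟩, by simp⟩
    have hge : ∀ x ∈ cuts, (j : Int) ≤ x := by
      intro x hx
      obtain ⟨hxm, hx0⟩ := List.mem_filter.mp hx
      obtain ⟨p, hp, hpx⟩ := List.mem_map.mp hxm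
      rw [hfind p] at hpx
      simp only [decide_eq_true_eq] at hx0
      rw [← hpx] at hx0 ⊢
      obtain ⟨hpre, _⟩ := PySem.Chars.find_spec hx0
      have hgp := pv_singleton_prefix_drop.mp hpre
      obtain ⟨hlen, hval⟩ := List.getElem?_eq_some_iff.mp hgp
      by_contra hlt
      push Not at hlt
      have hltj : (PySem.Chars.find l [p]).toNat < j := by omega
      have := hmin _ hltj
      simp only [decide_eq_true_eq] at this
      exact this ((hmem _).mpr (by rw [hval]; exact hp))
    cases hm : PySem.List.min? cuts (fun x => x) with
    | none =>
      exact absurd ((PySem.List.min?_eq_none_iff cuts _).mp hm ▸ hjmem) (List.not_mem_nil)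
    | some m =>
      have h1 : m ∈ cuts := PySem.List.min?_mem hm
      have h2 : m ≤ (j : Int) := PySem.List.min?_isMin hm _ hjmem
      have h3 : (j : Int) ≤ m := hge m h1
      have : m = (j : Int) := le_antisymm h2 h3
      simp [this]

theorem trim_to_nearest_punctuation_spec : Claim_equal_trim_to_nearest_punctuation := by
  intro s _
  unfold Spec_trim_to_nearest_punctuation trim_to_nearest_punctuation trim_to_nearest_punctuation_alt
  by_cases hg : (PySem.Str.split₀ s).length < 20
  · simp [hg]
  · simp only [hg, if_false]
    exact pv_main s
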